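-- pv_equiv track=rewrite | github.com/winezer0/tree_sitter_demo | tree-sitter-2025/tree_sitter_uitls.py | find_node_info_by_line_nearest
-- ===== SOURCE A (Python) =====
-- def find_node_info_by_line_nearest(code_line:int, infos, start_key):
--     """
--     根据目标行号查找最近的节点信息 可能存在误差的
--     根据目标行号查找最近的类对象创建信息名称（类对象创建的开始行号必须小于等于目标行号）
--     """
--     find_info = {}
--     if not infos:
--         return find_info
--
--     # 筛选出所有行号小于等于目标行号的命名空间
--     filtered_infos = [x for x in infos if x[start_key] <= code_line]
--     if len(filtered_infos) == 1:
--         find_info = filtered_infos[0]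
--     elif len(filtered_infos) > 1:
--         find_info = max(filtered_infos, key=lambda ns: ns[start_key])
--     return find_info
-- ===== SOURCE B (Python) =====
-- def find_node_info_by_line_nearest(code_line: int, infos, start_key):
--     """Single pass keeping the best (largest start_key <= code_line) node seen so far."""
--     found = False
--     best = {}
--     best_key = 0
--     for x in infos:
--         k = x[start_key]
--         if k <= code_line and (not found or k > best_key):
--             best, best_key, found = x, k, True
--     return best
-- ===== Notes on version B (the rewrite author's own statement) =====
-- stated objective: simpler
-- what changed: Replaces build-a-filtered-list then length-case-split plus max(key=...) with one pass that maintains the current best node and its key (strict > keeps the first of tied keys, like max).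
import Mathlib
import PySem

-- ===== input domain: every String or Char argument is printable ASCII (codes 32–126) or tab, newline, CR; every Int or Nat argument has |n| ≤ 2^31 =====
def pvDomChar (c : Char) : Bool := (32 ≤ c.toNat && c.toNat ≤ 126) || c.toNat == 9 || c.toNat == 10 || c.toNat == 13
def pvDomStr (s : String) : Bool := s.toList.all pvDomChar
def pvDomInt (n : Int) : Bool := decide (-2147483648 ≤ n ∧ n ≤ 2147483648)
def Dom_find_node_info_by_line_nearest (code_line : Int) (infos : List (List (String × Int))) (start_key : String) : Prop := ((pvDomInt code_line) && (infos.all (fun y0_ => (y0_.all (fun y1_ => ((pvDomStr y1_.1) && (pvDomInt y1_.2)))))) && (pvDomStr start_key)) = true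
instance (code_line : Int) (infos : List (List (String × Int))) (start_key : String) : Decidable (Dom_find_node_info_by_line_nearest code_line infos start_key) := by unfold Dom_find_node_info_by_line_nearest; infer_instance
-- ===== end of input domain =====

-- B replaces A's filter-then-length-case-split-then-max with a single pass keeping the best node so far (simpler; no speed claim).

-- x[start_key] for a Python dict x, shared by both ports (raises KeyError when absent: Pre_ excludes that)
def pvKeyOf (start_key : String) (x : List (String × Int)) : Int :=
  PySem.Dict.getD ⟨x⟩ start_key 0

-- ===== PORT A =====
def find_node_info_by_line_nearest (code_line : Int) (infos : List (List (String × Int))) (start_key : String) : List (String × Int) :=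
  if infos = [] then []
  else
    let filtered := infos.filter (fun x => decide (pvKeyOf start_key x ≤ code_line))
    if filtered.length = 1 then filtered.headD []
    else if 1 < filtered.length then
      (PySem.List.max? filtered (pvKeyOf start_key)).getD []
    else []

-- ===== PORT B =====
-- one loop iteration of Source B: acc = none ↔ found = False; acc = some (best, best_key) otherwise
def pvAltStep (code_line : Int) (start_key : String)
    (acc : Option (List (String × Int) × Int)) (x : List (String × Int)) :
    Option (List (String × Int) × Int) :=
  let k := pvKeyOf start_key x
  match acc with
  | none => if k ≤ code_line then some (x, k) else none
  | some (b, bk) => if k ≤ code_line ∧ bk < k then some (x, k) else some (b, bk)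

def find_node_info_by_line_nearest_alt (code_line : Int) (infos : List (List (String × Int))) (start_key : String) : List (String × Int) :=
  match infos.foldl (pvAltStep code_line start_key) none with
  | none => []
  | some (b, _) => b

-- ===== PRECONDITION & SPEC =====
-- Pre_: every info dict contains start_key (otherwise Python's x[start_key] raises KeyError)
def Pre_find_node_info_by_line_nearest (code_line : Int) (infos : List (List (String × Int))) (start_key : String) : Prop :=
  ∀ x ∈ infos, (PySem.Dict.get? (⟨x⟩ : PySem.Dict String Int) start_key).isSome = true
instance (code_line : Int) (infos : List (List (String × Int))) (start_key : String) : Decidable (Pre_find_node_info_by_line_nearest code_line infos start_key) := by unfold Pre_find_node_info_by_line_nearest; infer_instance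

def pvWitness_find_node_info_by_line_nearest : Int × (List (List (String × Int))) × String :=
  (5, [[("s", 3)], [("s", 9)]], "s")

def Spec_find_node_info_by_line_nearest (code_line : Int) (infos : List (List (String × Int))) (start_key : String) (out : List (String × Int)) : Prop := out = find_node_info_by_line_nearest_alt code_line infos start_key
instance (code_line : Int) (infos : List (List (String × Int))) (start_key : String) (out : List (String × Int)) : Decidable (Spec_find_node_info_by_line_nearest code_line infos start_key out) := by unfold Spec_find_node_info_by_line_nearest; infer_instance

-- ===== CLAIM (what is proved, stated in full; the proofs are below) =====
def Claim_equal_find_node_info_by_line_nearest : Prop := ∀ (code_line : Int) (infos : List (List (String × Int))) (start_key : String), Dom_find_node_info_by_line_nearest code_line infos start_key → Pre_find_node_info_by_line_nearest code_line infos start_key → Spec_find_node_info_by_line_nearest code_line infos start_key (find_node_info_by_line_nearest code_line infos start_key)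

-- ===== LEMMAS AND PROOFS =====

-- B's loop is the max?-fold restricted to the elements passing A's filter
theorem pvFold_filter (code_line : Int) (start_key : String) (l : List (List (String × Int)))
    (o : Option (List (String × Int))) :
    l.foldl (pvAltStep code_line start_key) (o.map (fun m => (m, pvKeyOf start_key m)))
      = ((l.filter (fun x => decide (pvKeyOf start_key x ≤ code_line))).foldl
          (fun acc x => match acc with
            | none => some x
            | some m => if pvKeyOf start_key m < pvKeyOf start_key x then some x else some m)
          o).map (fun m => (m, pvKeyOf start_key m)) := by
  induction l generalizing o with
  | nil => rfl
  | cons x t ih =>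
    rw [List.foldl_cons]
    by_cases hx : pvKeyOf start_key x ≤ code_line
    · rw [List.filter_cons_of_pos (by simpa using hx), List.foldl_cons]
      cases o with
      | none =>
        have h1 : pvAltStep code_line start_key (Option.map (fun m => (m, pvKeyOf start_key m)) none) x
            = Option.map (fun m => (m, pvKeyOf start_key m)) (some x) := by
          simp [pvAltStep, hx]
        rw [h1]; exact ih (some x)
      | some m =>
        by_cases hlt : pvKeyOf start_key m < pvKeyOf start_key x
        · have h1 : pvAltStep code_line start_key (Option.map (fun m => (m, pvKeyOf start_key m)) (some m)) x
              = Option.map (fun m => (m, pvKeyOf start_key m)) (some x) := by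
            simp [pvAltStep, hx, hlt]
          have h2 : (match some m with
              | none => some x
              | some mm => if pvKeyOf start_key mm < pvKeyOf start_key x then some x else some mm)
              = some x := by simp [hlt]
          rw [h1, h2]; exact ih (some x)
        · have h1 : pvAltStep code_line start_key (Option.map (fun m => (m, pvKeyOf start_key m)) (some m)) x
              = Option.map (fun m => (m, pvKeyOf start_key m)) (some m) := by
            simp [pvAltStep, hx, hlt]
          have h2 : (match some m with
              | none => some x
              | some mm => if pvKeyOf start_key mm < pvKeyOf start_key x then some x else some mm)
              = some m := by simp [hlt]
          rw [h1, h2]; exact ih (some m)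
    · rw [List.filter_cons_of_neg (by simpa using hx)]
      have h1 : pvAltStep code_line start_key (Option.map (fun m => (m, pvKeyOf start_key m)) o) x
          = Option.map (fun m => (m, pvKeyOf start_key m)) o := by
        cases o with
        | none => simp [pvAltStep, hx]
        | some m => simp [pvAltStep, hx]
      rw [h1]; exact ih o

-- A's length case split collapses to (max? filtered key).getD []
theorem pvA_normal (code_line : Int) (infos : List (List (String × Int))) (start_key : String) :
    find_node_info_by_line_nearest code_line infos start_key
      = (PySem.List.max? (infos.filter (fun x => decide (pvKeyOf start_key x ≤ code_line)))
          (pvKeyOf start_key)).getD [] := by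
  unfold find_node_info_by_line_nearest
  by_cases h : infos = []
  · subst h; rfl
  · simp only [if_neg h]
    cases hf : infos.filter (fun x => decide (pvKeyOf start_key x ≤ code_line)) with
    | nil => rfl
    | cons a t =>
      cases t with
      | nil => simp [PySem.List.max?]
      | cons b u =>
        simp only [List.length_cons]
        rw [if_neg (by omega), if_pos (by omega)]

-- ===== VERDICT (by name: the statement is the Claim_ definition above) =====
theorem find_node_info_by_line_nearest_spec : Claim_equal_find_node_info_by_line_nearest := by
  intro code_line infos start_key _ _
  unfold Spec_find_node_info_by_line_nearest
  rw [pvA_normal]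
  unfold find_node_info_by_line_nearest_alt
  have h2 : infos.foldl (pvAltStep code_line start_key) none
      = (PySem.List.max? (infos.filter (fun x => decide (pvKeyOf start_key x ≤ code_line)))
          (pvKeyOf start_key)).map (fun m => (m, pvKeyOf start_key m)) := by
    have h := pvFold_filter code_line start_key infos none
    simp only [Option.map_none] at h
    rw [h]
    unfold PySem.List.max?
    congr 1
    apply PySem.List.foldl_congr_mem
    intro acc x _
    cases acc <;> rfl
  rw [h2]
  cases PySem.List.max? (infos.filter (fun x => decide (pvKeyOf start_key x ≤ code_line)))
      (pvKeyOf start_key) with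
  | none => rfl
  | some m => rfl
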